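-- pv_equiv track=rewrite | github.com/rafamartinc/qec_qie_5q | aux_functions.py | is_valid_modification_of_V_s
-- ===== SOURCE A (Python) =====
-- def is_valid_modification_of_V_s(included_variables: list, excluded_variables: list, V_s: dict) -> bool:
--     """
--     When considering an update to a set V_u under construction, by including a set of variables
--     that must be included in the final form of V_s, and a set of variables that must not be
--     included, this function helps determine wether that is compatible with the contents of V_s that
--     have already been established before. For example, if we want to include the variable B_0 in
--     V_s but that variable was already flagged for exclusion when considering a previous monomial,
--     this function will return False.
--
--     :param included_variables: List of variables we would like to include in V_s, such as [B_0, C_2].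
--
--     :param excluded_variables: List of variables we would not want to put in V_s, because that will
--         may no longer change the sign of a previously seen monomial. E.g.: [D_1].
--
--     :param V_s: Configuration of V_s so far, stating which variables will be included in the final set,
--         and which ones can not be included, according to the monomials already considered. It takes
--         the shape of a dictionary with the variables as keys, and a boolean value for each key,
--         indicating whether that variable is included or not. Missing variables have not been
--         considered yet. E.g.: {B_0: True, B_2: False, C_0: False, C_1: False, C_2: False}.
--
--     :result: True if V_s can be modified as suggested, False otherwise.
--     """
--
--     result = True
--
--     i = 0
--     while result and i < len(included_variables):
--         variable = included_variables[i]
--         if variable in V_s and V_s[variable] is False: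
--             result = False
--         i += 1
--
--     i = 0
--     while result and i < len(excluded_variables):
--         variable = excluded_variables[i]
--         if variable in V_s and V_s[variable] is True:
--             result = False
--         i += 1
--
--     return result
-- ===== SOURCE B (Python) =====
-- def is_valid_modification_of_V_s(included_variables: list, excluded_variables: list, V_s: dict) -> bool:
--     inc = set(included_variables)
--     exc = set(excluded_variables)
--     for variable, flag in V_s.items():
--         if flag is False and variable in inc:
--             return False
--         if flag is True and variable in exc:
--             return False
--     return True
-- ===== Notes on version B (the rewrite author's own statement) =====
-- stated objective: alternative
-- what changed: B builds sets of the included and excluded variables once and makes a single early-exit pass over V_s.items(), instead of A's two sentinel-flag while-loops that look each list element up in the dict.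
import Mathlib
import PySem

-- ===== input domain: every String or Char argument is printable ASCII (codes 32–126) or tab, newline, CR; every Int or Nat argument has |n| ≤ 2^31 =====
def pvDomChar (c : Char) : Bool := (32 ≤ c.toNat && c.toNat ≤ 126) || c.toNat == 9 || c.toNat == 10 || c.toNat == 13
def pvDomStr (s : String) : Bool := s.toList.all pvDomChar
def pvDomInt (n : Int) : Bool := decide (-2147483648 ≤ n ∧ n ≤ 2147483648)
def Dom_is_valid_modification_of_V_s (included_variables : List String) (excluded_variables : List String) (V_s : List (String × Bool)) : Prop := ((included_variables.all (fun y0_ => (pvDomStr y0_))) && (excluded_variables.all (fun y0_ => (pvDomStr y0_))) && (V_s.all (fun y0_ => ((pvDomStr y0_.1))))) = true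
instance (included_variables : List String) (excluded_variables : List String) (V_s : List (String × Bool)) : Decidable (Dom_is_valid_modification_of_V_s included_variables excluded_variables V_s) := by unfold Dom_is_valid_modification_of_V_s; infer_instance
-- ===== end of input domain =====

-- B replaces A's two sentinel-flag while-loops (each looking its list's variables up in V_s)
-- by one early-exit pass over V_s's items against two prebuilt sets: an alternative traversal, same cost class.


-- ===== PORT A =====
-- A's while-loop over one variable list: exits (result = False) as soon as a variable is present
-- in V_s with value `bad` ('variable in V_s and V_s[variable] is <bad>'); dict lookup = first match.
def pvA_loop (V_s : List (String × Bool)) (bad : Bool) : List String → Bool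
  | [] => true
  | v :: rest =>
      if (PySem.Dict.mk V_s).get? v = some bad then false else pvA_loop V_s bad rest

def is_valid_modification_of_V_s (included_variables : List String) (excluded_variables : List String) (V_s : List (String × Bool)) : Bool :=
  -- first while-loop (included, conflicts with False); second runs only while result is still True
  if pvA_loop V_s false included_variables then pvA_loop V_s true excluded_variables else false

-- ===== PORT B =====
-- B's single pass over V_s.items() with early return.
def pvB_scan (incS excS : PySem.Set String) : List (String × Bool) → Bool
  | [] => true
  | (v, flag) :: rest =>
      if flag = false ∧ incS.contains v then false
      else if flag = true ∧ excS.contains v then false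
      else pvB_scan incS excS rest

def is_valid_modification_of_V_s_alt (included_variables : List String) (excluded_variables : List String) (V_s : List (String × Bool)) : Bool :=
  pvB_scan (PySem.Set.ofList included_variables) (PySem.Set.ofList excluded_variables) V_s

-- ===== PRECONDITION & SPEC =====
-- Pre_ excludes association lists with duplicate keys: those are not representable as a Python dict
-- (V_s is a dict), so Python A is never run on them; every real dict input satisfies Pre_.
def Pre_is_valid_modification_of_V_s (included_variables : List String) (excluded_variables : List String) (V_s : List (String × Bool)) : Prop :=
  (V_s.map Prod.fst).Nodup
instance (included_variables : List String) (excluded_variables : List String) (V_s : List (String × Bool)) : Decidable (Pre_is_valid_modification_of_V_s included_variables excluded_variables V_s) := by unfold Pre_is_valid_modification_of_V_s; infer_instance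

def pvWitness_is_valid_modification_of_V_s : List String × List String × (List (String × Bool)) :=
  (["B_0"], ["D_1"], [("B_0", true), ("C_2", false)])

def Spec_is_valid_modification_of_V_s (included_variables : List String) (excluded_variables : List String) (V_s : List (String × Bool)) (out : Bool) : Prop := out = is_valid_modification_of_V_s_alt included_variables excluded_variables V_s
instance (included_variables : List String) (excluded_variables : List String) (V_s : List (String × Bool)) (out : Bool) : Decidable (Spec_is_valid_modification_of_V_s included_variables excluded_variables V_s out) := by unfold Spec_is_valid_modification_of_V_s; infer_instance

-- ===== CLAIM (what is proved, stated in full; the proofs are below) =====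
def Claim_equal_is_valid_modification_of_V_s : Prop := ∀ (included_variables : List String) (excluded_variables : List String) (V_s : List (String × Bool)), Dom_is_valid_modification_of_V_s included_variables excluded_variables V_s → Pre_is_valid_modification_of_V_s included_variables excluded_variables V_s → Spec_is_valid_modification_of_V_s included_variables excluded_variables V_s (is_valid_modification_of_V_s included_variables excluded_variables V_s)

-- ===== LEMMAS AND PROOFS =====

theorem pvA_loop_true_iff (V_s : List (String × Bool)) (bad : Bool) (vars : List String) :
    pvA_loop V_s bad vars = true ↔ ∀ v ∈ vars, (PySem.Dict.mk V_s).get? v ≠ some bad := by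
  induction vars with
  | nil => simp [pvA_loop]
  | cons v rest ih =>
      simp only [pvA_loop]
      split_ifs with h
      · simp [h]
      · simp [h, ih]

theorem pvB_scan_true_iff (incS excS : PySem.Set String) (items : List (String × Bool)) :
    pvB_scan incS excS items = true ↔
      ∀ p ∈ items, ¬(p.2 = false ∧ incS.contains p.1) ∧ ¬(p.2 = true ∧ excS.contains p.1) := by
  induction items with
  | nil => simp [pvB_scan]
  | cons p rest ih =>
      obtain ⟨v, flag⟩ := p
      simp only [pvB_scan]
      split_ifs with h1 h2
      · simp only [false_iff]
        intro hall
        exact (hall (v, flag) (List.mem_cons_self ..)).1 h1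
      · simp only [false_iff]
        intro hall
        exact (hall (v, flag) (List.mem_cons_self ..)).2 h2
      · rw [ih]
        constructor
        · intro hr p hp
          rcases List.mem_cons.mp hp with he | hm
          · subst he; exact ⟨h1, h2⟩
          · exact hr p hm
        · intro hall p hp
          exact hall p (List.mem_cons_of_mem _ hp)

-- with nodup keys, membership determines the dict lookup
theorem get?_of_mem_nodup (V_s : List (String × Bool)) (h : (V_s.map Prod.fst).Nodup)
    (v : String) (f : Bool) (hm : (v, f) ∈ V_s) : (PySem.Dict.mk V_s).get? v = some f := by
  induction V_s with
  | nil => simp at hm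
  | cons p rest ih =>
      obtain ⟨k, w⟩ := p
      simp only [List.map_cons, List.nodup_cons] at h
      rcases List.mem_cons.mp hm with he | hr
      · cases he
        simp [PySem.Dict.get?, List.find?]
      · have hk : k ≠ v := by
          intro hkv; exact h.1 (by simpa [hkv] using List.mem_map_of_mem (f := Prod.fst) hr)
        simp only [PySem.Dict.get?, List.find?] at *
        rw [show ((k, w).1 == v) = false from by simp [hk]]
        exact ih h.2 hr

-- a successful lookup comes from a member pair (no nodup needed)
theorem mem_of_get?_eq (V_s : List (String × Bool)) (v : String) (f : Bool)
    (h : (PySem.Dict.mk V_s).get? v = some f) : (v, f) ∈ V_s := by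
  simp only [PySem.Dict.get?, Option.map_eq_some_iff] at h
  obtain ⟨p, hp, hf⟩ := h
  have := List.find?_some hp
  have hm := List.mem_of_find?_eq_some hp
  obtain ⟨k, w⟩ := p
  simp at this hf
  subst this; subst hf; exact hm

-- ===== VERDICT (by name: the statement is the Claim_ definition above) =====
theorem is_valid_modification_of_V_s_spec : Claim_equal_is_valid_modification_of_V_s := by
  intro inc exc V_s _hDom hPre
  unfold Spec_is_valid_modification_of_V_s is_valid_modification_of_V_s is_valid_modification_of_V_s_alt
  have hiff : (if pvA_loop V_s false inc then pvA_loop V_s true exc else false) = true ↔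
      pvB_scan (PySem.Set.ofList inc) (PySem.Set.ofList exc) V_s = true := by
    rw [pvB_scan_true_iff]
    constructor
    · intro hA
      have hA' : pvA_loop V_s false inc = true ∧ pvA_loop V_s true exc = true := by
        by_cases h : pvA_loop V_s false inc = true <;> simp [h] at hA <;> simp [h, hA]
      rw [pvA_loop_true_iff] at hA'
      have hA'' := hA'.1
      have hA2 := (pvA_loop_true_iff V_s true exc).mp (by
        by_cases h : pvA_loop V_s false inc = true <;> simp [h] at hA <;> exact hA)
      intro p hp
      obtain ⟨v, f⟩ := p
      constructor
      · rintro ⟨hf, hc⟩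
        have hv : v ∈ inc := by
          have := List.contains_iff_mem.mp hc
          exact (PySem.Set.mem_ofList inc v).mp this
        subst hf
        exact hA'' v hv (get?_of_mem_nodup V_s hPre v false hp)
      · rintro ⟨hf, hc⟩
        have hv : v ∈ exc := by
          have := List.contains_iff_mem.mp hc
          exact (PySem.Set.mem_ofList exc v).mp this
        subst hf
        exact hA2 v hv (get?_of_mem_nodup V_s hPre v true hp)
    · intro hB
      have h1 : pvA_loop V_s false inc = true := by
        rw [pvA_loop_true_iff]
        intro v hv hget
        have hm := mem_of_get?_eq V_s v false hget
        have := (hB (v, false) hm).1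
        exact this ⟨rfl, List.contains_iff_mem.mpr ((PySem.Set.mem_ofList inc v).mpr hv)⟩
      have h2 : pvA_loop V_s true exc = true := by
        rw [pvA_loop_true_iff]
        intro v hv hget
        have hm := mem_of_get?_eq V_s v true hget
        have := (hB (v, true) hm).2
        exact this ⟨rfl, List.contains_iff_mem.mpr ((PySem.Set.mem_ofList exc v).mpr hv)⟩
      simp [h1, h2]
  exact Bool.eq_iff_iff.mpr hiff
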